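-- pv_equiv track=rewrite | github.com/bitsofbits/advent_of_code | 2022/day_20/python/implementation.py | equiv
-- ===== SOURCE A (Python) =====
-- from collections import deque
--
-- def equiv(x, y):
--     """x and y are the same within a rotation"""
--     if x == y:
--         return True
--     x = deque(x)
--     y = deque(y)
--     for i in range(len(x) - 1):
--         y.rotate(1)
--         if x == y:
--             return True
--     return False
-- ===== SOURCE B (Python) =====
-- def equiv(x, y):
--     """x and y are the same within a rotation"""
--     n = len(x)
--     if n != len(y):
--         return False
--     if n == 0:
--         return True
--     xx = x + x
--     for i in range(n):
--         if all(xx[i + j] == y[j] for j in range(n)):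
--             return True
--     return False
-- ===== Notes on version B (the rewrite author's own statement) =====
-- stated objective: alternative
-- what changed: B checks whether y occurs as a contiguous block of the doubled list x+x (after a length check), instead of repeatedly rotating a deque copy of y and comparing.
import Mathlib
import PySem

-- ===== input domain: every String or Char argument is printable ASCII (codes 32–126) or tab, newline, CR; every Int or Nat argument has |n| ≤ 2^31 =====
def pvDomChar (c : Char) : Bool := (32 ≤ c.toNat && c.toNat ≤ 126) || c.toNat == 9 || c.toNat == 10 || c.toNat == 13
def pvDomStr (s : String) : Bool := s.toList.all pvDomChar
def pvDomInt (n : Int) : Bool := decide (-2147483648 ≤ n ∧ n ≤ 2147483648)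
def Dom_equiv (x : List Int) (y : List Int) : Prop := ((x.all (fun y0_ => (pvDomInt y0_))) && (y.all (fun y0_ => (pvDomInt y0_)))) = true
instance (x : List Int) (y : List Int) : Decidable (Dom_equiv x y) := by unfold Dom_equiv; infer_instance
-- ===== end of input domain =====

-- B tests whether y occurs as a contiguous block of the doubled list x ++ x (after a length
-- check) instead of A's repeated deque rotation; same cost class, different algorithm.

-- ===== PORT A =====
-- deque.rotate(1): move the last element to the front (no-op on the empty deque)
def pyRotate1 (l : List Int) : List Int :=
  match l.getLast? with
  | none => l
  | some a => a :: l.dropLast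

-- 'for i in range(k): y.rotate(1); if x == y: return True' as fuel recursion on k
def equivLoopA (x : List Int) : Nat → List Int → Bool
  | 0, _ => false
  | Nat.succ k, y =>
      let y' := pyRotate1 y
      if x = y' then true else equivLoopA x k y'

def equiv (x : List Int) (y : List Int) : Bool :=
  if x = y then true
  else equivLoopA x (x.length - 1) y      -- range(len(x) - 1); Nat '-' matches: range(-1) is empty

-- ===== PORT B =====
def equiv_alt (x : List Int) (y : List Int) : Bool :=
  if x.length ≠ y.length then false
  else if x.length = 0 then true
  else
    (List.range x.length).any (fun i =>
      (List.range x.length).all (fun j =>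
        decide (PySem.List.pyGet? (x ++ x) ((i : Int) + (j : Int)) = PySem.List.pyGet? y ((j : Nat) : Int))))

-- ===== PRECONDITION & SPEC =====
def Spec_equiv (x : List Int) (y : List Int) (out : Bool) : Prop := out = equiv_alt x y
instance (x : List Int) (y : List Int) (out : Bool) : Decidable (Spec_equiv x y out) := by unfold Spec_equiv; infer_instance

-- ===== CLAIM (what is proved, stated in full; the proofs are below) =====
def Claim_equal_equiv : Prop := ∀ (x : List Int) (y : List Int), Dom_equiv x y → Spec_equiv x y (equiv x y)

-- ===== LEMMAS AND PROOFS =====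

-- pyRotate1 is List.rotate by length - 1
theorem pyRotate1_eq_rotate (l : List Int) (h : l ≠ []) :
    pyRotate1 l = l.rotate (l.length - 1) := by
  obtain ⟨init, a, rfl⟩ := (List.eq_nil_or_concat l).resolve_left h
  rw [List.rotate_eq_drop_append_take (by simp)]
  simp [pyRotate1]

theorem iterate_pyRotate1 (y : List Int) (hy : y ≠ []) (i : Nat) :
    pyRotate1^[i] y = y.rotate (i * (y.length - 1)) := by
  induction i with
  | zero => simp
  | succ i ih =>
      rw [Function.iterate_succ_apply', ih,
        pyRotate1_eq_rotate _ (by simp [← List.length_pos_iff] at hy ⊢; omega),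
        List.length_rotate, List.rotate_rotate, Nat.succ_mul]

theorem equivLoopA_iff (x : List Int) (k : Nat) (y : List Int) :
    equivLoopA x k y = true ↔ ∃ i, 1 ≤ i ∧ i ≤ k ∧ x = pyRotate1^[i] y := by
  induction k generalizing y with
  | zero => simp [equivLoopA]
  | succ k ih =>
      simp only [equivLoopA]
      by_cases hx : x = pyRotate1 y
      · simp only [if_pos hx, true_iff]
        exact ⟨1, le_refl _, by omega, by simpa using hx⟩
      · rw [if_neg hx, ih]
        constructor
        · rintro ⟨i, h1, h2, rfl⟩
          exact ⟨i + 1, by omega, by omega, by rw [Function.iterate_succ_apply]⟩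
        · rintro ⟨i, h1, h2, rfl⟩
          match i, h1 with
          | 1, _ => exact absurd (by simp) hx
          | (j+2), _ =>
              exact ⟨j + 1, by omega, by omega, by rw [← Function.iterate_succ_apply]⟩

theorem equiv_iff (x y : List Int) : equiv x y = true ↔ List.IsRotated y x := by
  unfold equiv
  by_cases hxy : x = y
  · subst hxy; rw [if_pos rfl]; simp only [true_iff]; exact List.IsRotated.refl _
  · rw [if_neg hxy, equivLoopA_iff]
    constructor
    · rintro ⟨i, h1, h2, rfl⟩
      rcases eq_or_ne y [] with rfl | hy
      · exact absurd (Function.iterate_fixed rfl i) hxy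
      · rw [iterate_pyRotate1 _ hy]
        exact ⟨i * (y.length - 1), rfl⟩
    · rintro ⟨m, rfl⟩
      have hn : (y.rotate m).length = y.length := List.length_rotate y m
      rcases Nat.eq_zero_or_pos y.length with h0 | hpos
      · exact absurd (by simp [List.length_eq_zero_iff.mp h0]) hxy
      · have hy : y ≠ [] := by
          intro h; rw [h] at hpos; simp at hpos
        have hm' : m % y.length < y.length := Nat.mod_lt _ hpos
        have hrot : y.rotate (m % y.length) = y.rotate m := List.rotate_mod y m
        have hm0 : 1 ≤ m % y.length := by
          rcases Nat.eq_zero_or_pos (m % y.length) with hz | h1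
          · exact absurd (show y.rotate m = y by
              rw [← hrot, hz, List.rotate_zero]) hxy
          · exact h1
        refine ⟨y.length - m % y.length, by omega, by omega, ?_⟩
        rw [iterate_pyRotate1 _ hy]
        have hkey : (y.length - m % y.length) * (y.length - 1)
            = y.length * (y.length - 1 - m % y.length) + m % y.length := by
          zify [Nat.le_of_lt hm', hm0, Nat.le_sub_one_of_lt hm', hpos]
          ring
        rw [hkey, ← List.rotate_mod y (y.length * (y.length - 1 - m % y.length) + m % y.length),
          Nat.mul_add_mod, List.rotate_mod, hrot]

theorem equiv_alt_iff (x y : List Int) : equiv_alt x y = true ↔ List.IsRotated x y := by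
  unfold equiv_alt
  by_cases hlen : x.length ≠ y.length
  · rw [if_pos hlen]
    simp only [Bool.false_eq_true, false_iff]
    rintro ⟨m, rfl⟩
    exact hlen (List.length_rotate x m).symm
  · rw [not_ne_iff] at hlen
    rw [if_neg (by omega)]
    rcases Nat.eq_zero_or_pos x.length with h0 | hpos
    · rw [if_pos h0]
      simp only [true_iff]
      rw [List.length_eq_zero_iff.mp h0, List.length_eq_zero_iff.mp (show y.length = 0 by omega)]
    · rw [if_neg (by omega), List.any_eq_true]
      have hblk : ∀ i : Nat, i ≤ x.length → ((x ++ x).drop i).take x.length = x.rotate i := by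
        intro i hi
        rw [List.drop_append, Nat.sub_eq_zero_of_le hi,
          List.drop_zero, List.take_append, List.take_of_length_le (by simp),
          List.length_drop, Nat.sub_sub_self hi, List.rotate_eq_drop_append_take hi]
      have hinner : ∀ i : Nat, i ≤ x.length →
          (((List.range x.length).all (fun j =>
            decide (PySem.List.pyGet? (x ++ x) ((i : Int) + (j : Int)) = PySem.List.pyGet? y ((j : Nat) : Int)))) = true
          ↔ x.rotate i = y) := by
        intro i hi
        rw [List.all_eq_true]
        have hcast : ∀ j : Nat, ((i : Int) + (j : Int)) = (((i + j : Nat) : Int)) := by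
          intro j; push_cast; ring
        constructor
        · intro h
          apply List.ext_getElem?
          intro j
          by_cases hj : j < x.length
          · have hj' := h j (List.mem_range.mpr hj)
            rw [decide_eq_true_iff, hcast j, PySem.List.pyGet?_natCast, PySem.List.pyGet?_natCast] at hj'
            rw [← hblk i hi, List.getElem?_take_of_lt hj, List.getElem?_drop]
            exact hj'
          · rw [List.getElem?_eq_none (by rw [List.length_rotate]; omega),
              List.getElem?_eq_none (by omega)]
        · intro h j hj
          rw [List.mem_range] at hj
          rw [decide_eq_true_iff, hcast j, PySem.List.pyGet?_natCast, PySem.List.pyGet?_natCast,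
            ← List.getElem?_drop, ← List.getElem?_take_of_lt hj, hblk i hi, h]
      constructor
      · rintro ⟨i, hi, hall⟩
        rw [List.mem_range] at hi
        exact ⟨i, (hinner i (by omega)).mp hall⟩
      · rintro ⟨m, rfl⟩
        refine ⟨m % x.length, List.mem_range.mpr (Nat.mod_lt _ hpos), ?_⟩
        rw [hinner _ (Nat.le_of_lt (Nat.mod_lt _ hpos)), List.rotate_mod]

-- ===== VERDICT (by name: the statement is the Claim_ definition above) =====
theorem equiv_spec : Claim_equal_equiv := by
  intro x y _
  unfold Spec_equiv
  rw [Bool.eq_iff_iff, equiv_iff, equiv_alt_iff]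
  exact List.isRotated_comm
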